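-- pv_equiv track=rewrite | github.com/jyshtty/leet_code | lifting_weghts.py | weightCapacity
-- ===== SOURCE A (Python) =====
-- def weightCapacity(weights, maxCapacity):
--     max_sum = set([0])
--     for weight in weights:
--         temp = set([0])
--         for i in max_sum:
--             if weight + i == maxCapacity:
--                 return maxCapacity
--             elif (weight + i) < maxCapacity:
--                 temp.add(weight + i)
--         max_sum.update(temp)
--     return max(max_sum)
-- ===== SOURCE B (Python) =====
-- def weightCapacity(weights, maxCapacity):
--     # Depth-first search over the state graph (k, s): s is a sum reachable after
--     # deciding the first k weights while staying below maxCapacity; explicit stack,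
--     # visited set, exact hit detected on the edge.
--     n = len(weights)
--     seen = {(0, 0)}
--     stack = [(0, 0)]
--     while stack:
--         k, s = stack.pop()
--         if k == n:
--             continue
--         t = s + weights[k]
--         if t == maxCapacity:
--             return maxCapacity
--         if t < maxCapacity and (k + 1, t) not in seen:
--             seen.add((k + 1, t))
--             stack.append((k + 1, t))
--         if (k + 1, s) not in seen:
--             seen.add((k + 1, s))
--             stack.append((k + 1, s))
--     return max(s for _, s in seen)
-- ===== Notes on version B (the rewrite author's own statement) =====
-- stated objective: alternative
-- what changed: Replaces A's generation-by-generation set evolution (per-weight scan of the whole sum set, hash-set update, final max()) by a depth-first search with an explicit stack and a visited set over the state graph (index, sum), detecting the exact hit on the edge and taking the max over all visited states at the end; the depth-first order reaches an exact hit without first materializing whole generations.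
import Mathlib
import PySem

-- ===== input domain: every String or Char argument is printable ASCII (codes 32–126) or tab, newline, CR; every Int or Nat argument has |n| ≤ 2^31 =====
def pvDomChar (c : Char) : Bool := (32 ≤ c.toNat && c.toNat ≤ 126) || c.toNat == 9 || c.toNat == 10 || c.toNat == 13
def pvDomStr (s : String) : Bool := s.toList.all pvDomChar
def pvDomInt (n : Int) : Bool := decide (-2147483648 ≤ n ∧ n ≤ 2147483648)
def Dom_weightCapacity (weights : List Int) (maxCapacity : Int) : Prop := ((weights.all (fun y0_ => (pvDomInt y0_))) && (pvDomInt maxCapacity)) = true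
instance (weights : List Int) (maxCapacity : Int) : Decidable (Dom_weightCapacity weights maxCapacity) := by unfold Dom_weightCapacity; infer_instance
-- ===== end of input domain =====

-- B replaces A's generation-by-generation set evolution (per-weight scan of the whole
-- sum set, set update, final max()) by a depth-first search with an explicit stack and
-- a visited set over the state graph (index, sum) (alternative, same asymptotic cost).

-- ===== PORT A =====
-- inner 'for i in max_sum' loop: 'none' = the 'return maxCapacity' early exit,
-- 'some temp' = the finished temp set.  (The result of A never depends on the
-- iteration order of the Python set: the early exit always returns maxCapacity.)
def pvInnerA (C w : Int) : List Int → PySem.Set Int → Option (PySem.Set Int)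
  | [], temp => some temp
  | i :: rest, temp =>
      if w + i = C then none
      else if w + i < C then pvInnerA C w rest (PySem.Set.add temp (w + i))
      else pvInnerA C w rest temp

-- outer 'for weight in weights' loop; 'max(max_sum)' at the end (max_sum always
-- contains 0, so it is nonempty and the .getD 0 totalisation never fires).
def pvOuterA (C : Int) : List Int → PySem.Set Int → Int
  | [], ms => (PySem.List.max? ms (fun x => x)).getD 0
  | w :: ws, ms =>
      match pvInnerA C w ms (PySem.Set.ofList [0]) with
      | none => C
      | some temp => pvOuterA C ws (PySem.Set.update ms temp)

def weightCapacity (weights : List Int) (maxCapacity : Int) : Int :=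
  pvOuterA maxCapacity weights (PySem.Set.ofList [0])

-- ===== PORT B =====
-- 'max(s for _, s in seen)': the max over a set's elements does not depend on the
-- iteration order; seen always holds (0, 0), so the .getD 0 totalisation never fires.
def pvFinishB (seen : PySem.Set (Nat × Int)) : Int :=
  (PySem.List.max? (seen.map (fun st => st.2)) (fun x => x)).getD 0

-- Source B's 'while stack:' loop, one iteration per call.  fuel is only a totality
-- guard: lemma pvB_char below shows the stack empties before it runs out (Python
-- needs none).  Python pops and pushes at the tail; the port pops and pushes at
-- the head — same discipline (LIFO), and the push order (t first, then s) is kept.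
def pvDfsB (C : Int) (n : Nat) (ws : List Int) :
    Nat → List (Nat × Int) → PySem.Set (Nat × Int) → Int
  | 0, _, seen => pvFinishB seen
  | _ + 1, [], seen => pvFinishB seen
  | fuel + 1, (k, s) :: rest, seen =>
      if k = n then pvDfsB C n ws fuel rest seen
      else
        let t := s + ws.getD k 0
        if t = C then C
        else
          let seen1 := if t < C ∧ PySem.Set.contains seen (k + 1, t) = false
                       then PySem.Set.add seen (k + 1, t) else seen
          let st1 := if t < C ∧ PySem.Set.contains seen (k + 1, t) = false
                     then (k + 1, t) :: rest else rest
          let seen2 := if PySem.Set.contains seen1 (k + 1, s) = false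
                       then PySem.Set.add seen1 (k + 1, s) else seen1
          let st2 := if PySem.Set.contains seen1 (k + 1, s) = false
                     then (k + 1, s) :: st1 else st1
          pvDfsB C n ws fuel st2 seen2

def weightCapacity_alt (weights : List Int) (maxCapacity : Int) : Int :=
  let n := weights.length
  pvDfsB maxCapacity n weights (2 + 2 * (n + 1) * 2 ^ n)
    [(0, 0)] (PySem.Set.ofList [(0, 0)])

-- ===== PRECONDITION & SPEC =====
def Spec_weightCapacity (weights : List Int) (maxCapacity : Int) (out : Int) : Prop := out = weightCapacity_alt weights maxCapacity
instance (weights : List Int) (maxCapacity : Int) (out : Int) : Decidable (Spec_weightCapacity weights maxCapacity out) := by unfold Spec_weightCapacity; infer_instance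

-- ===== CLAIM (what is proved, stated in full; the proofs are below) =====
def Claim_equal_weightCapacity : Prop := ∀ (weights : List Int) (maxCapacity : Int), Dom_weightCapacity weights maxCapacity → Spec_weightCapacity weights maxCapacity (weightCapacity weights maxCapacity)

-- ===== LEMMAS AND PROOFS =====

-- x is in A's running sum set after the (reversed) prefix rp has been processed.
def pvInM (C : Int) : List Int → Int → Prop
  | [], s => s = 0
  | w :: rp, s => pvInM C rp s ∨ (s < C ∧ pvInM C rp (s - w))

-- processing the remaining list l (current reversed prefix rp) hits C exactly.
def pvHitFrom (C : Int) : List Int → List Int → Prop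
  | _, [] => False
  | rp, w :: l => (∃ s, pvInM C rp s ∧ s + w = C) ∨ pvHitFrom C (w :: rp) l

-- the same, indexed from the start of the whole list (B's view).
def pvHit (C : Int) (ws : List Int) : Prop :=
  ∃ k s, k < ws.length ∧ pvInM C ((ws.take k).reverse) s ∧ s + ws.getD k 0 = C

def pvIsMax (C : Int) (rp : List Int) (m : Int) : Prop :=
  pvInM C rp m ∧ ∀ y, pvInM C rp y → y ≤ m

theorem pvInM_zero (C : Int) (rp : List Int) : pvInM C rp 0 := by
  induction rp with
  | nil => rfl
  | cons w rp ih => exact Or.inl ih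

theorem pvInM_ext (C : Int) (ext rp : List Int) (s : Int) (h : pvInM C rp s) :
    pvInM C (ext ++ rp) s := by
  induction ext with
  | nil => exact h
  | cons w ext ih => exact Or.inl ih

-- A's inner loop: when it early-returns, and the membership of the temp it builds.
theorem pvInnerA_spec (C w : Int) (l : List Int) (temp : PySem.Set Int) :
    (pvInnerA C w l temp = none ↔ ∃ i ∈ l, w + i = C) ∧
    (∀ temp', pvInnerA C w l temp = some temp' →
      ∀ x, x ∈ temp' ↔ x ∈ temp ∨ ∃ i ∈ l, x = w + i ∧ w + i < C) := by
  induction l generalizing temp with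
  | nil => simp [pvInnerA]
  | cons i rest ih =>
      by_cases h1 : w + i = C
      · simp [pvInnerA, h1]
      · by_cases h2 : w + i < C
        · constructor
          · simp only [pvInnerA, h1, h2, if_true, if_false, (ih _).1]
            simp [h1]
          · intro temp' ht x
            have := (ih (PySem.Set.add temp (w + i))).2 temp' (by
              simpa [pvInnerA, h1, h2] using ht) x
            rw [this, PySem.Set.mem_add]
            constructor
            · rintro ((hx | rfl) | ⟨j, hj, rfl, hlt⟩)
              · exact Or.inl hx
              · exact Or.inr ⟨i, by simp, rfl, h2⟩
              · exact Or.inr ⟨j, by simp [hj], rfl, hlt⟩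
            · rintro (hx | ⟨j, hj, rfl, hlt⟩)
              · exact Or.inl (Or.inl hx)
              · rcases List.mem_cons.mp hj with rfl | hj
                · exact Or.inl (Or.inr rfl)
                · exact Or.inr ⟨j, hj, rfl, hlt⟩
        · constructor
          · simp only [pvInnerA, h1, h2, if_false, (ih _).1]
            simp [h1]
          · intro temp' ht x
            have := (ih temp).2 temp' (by simpa [pvInnerA, h1, h2] using ht) x
            rw [this]
            constructor
            · rintro (hx | ⟨j, hj, rfl, hlt⟩)
              · exact Or.inl hx
              · exact Or.inr ⟨j, by simp [hj], rfl, hlt⟩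
            · rintro (hx | ⟨j, hj, rfl, hlt⟩)
              · exact Or.inl hx
              · rcases List.mem_cons.mp hj with rfl | hj
                · exact absurd hlt h2
                · exact Or.inr ⟨j, hj, rfl, hlt⟩

theorem pvA_char (C : Int) : ∀ (l rp : List Int) (ms : PySem.Set Int),
    (∀ x, x ∈ ms ↔ pvInM C rp x) →
    (pvHitFrom C rp l → pvOuterA C l ms = C) ∧
    (¬ pvHitFrom C rp l → pvIsMax C (l.reverse ++ rp) (pvOuterA C l ms)) := by
  intro l
  induction l with
  | nil =>
      intro rp ms hmem
      refine ⟨fun h => absurd h (by simp [pvHitFrom]), fun _ => ?_⟩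
      have h0 : (0 : Int) ∈ ms := (hmem 0).mpr (pvInM_zero C rp)
      obtain ⟨m, hm⟩ : ∃ m, PySem.List.max? ms (fun x => x) = some m := by
        cases hc : PySem.List.max? ms (fun x => x) with
        | none => exact absurd ((PySem.List.max?_eq_none_iff ms _).mp hc) (List.ne_nil_of_mem h0)
        | some m => exact ⟨m, rfl⟩
      simp only [pvOuterA, hm, Option.getD_some, List.reverse_nil, List.nil_append]
      exact ⟨(hmem m).mp (PySem.List.max?_mem hm),
        fun y hy => PySem.List.max?_isMax hm y ((hmem y).mpr hy)⟩
  | cons w l ih =>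
      intro rp ms hmem
      by_cases hnow : ∃ s, pvInM C rp s ∧ s + w = C
      · have hA : pvInnerA C w ms (PySem.Set.ofList [0]) = none := by
          obtain ⟨s, hs, hsw⟩ := hnow
          exact (pvInnerA_spec C w ms _).1.mpr ⟨s, (hmem s).mpr hs, by omega⟩
        refine ⟨fun _ => ?_, fun h => absurd (Or.inl hnow) h⟩
        simp [pvOuterA, hA]
      · obtain ⟨temp, htemp⟩ : ∃ t, pvInnerA C w ms (PySem.Set.ofList [0]) = some t := by
          cases hc : pvInnerA C w ms (PySem.Set.ofList [0]) with
          | none =>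
              obtain ⟨i, hi, hiw⟩ := (pvInnerA_spec C w ms _).1.mp hc
              exact absurd ⟨i, (hmem i).mp hi, by omega⟩ hnow
          | some t => exact ⟨t, rfl⟩
        have hmem2 : ∀ x, x ∈ PySem.Set.update ms temp ↔ pvInM C (w :: rp) x := by
          intro x
          rw [PySem.Set.mem_update, (pvInnerA_spec C w ms _).2 temp htemp x, PySem.Set.mem_ofList]
          show _ ↔ pvInM C rp x ∨ (x < C ∧ pvInM C rp (x - w))
          constructor
          · rintro (hx | (hx | ⟨i, hi, rfl, hlt⟩))
            · exact Or.inl ((hmem x).mp hx)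
            · simp at hx; subst hx; exact Or.inl (pvInM_zero C rp)
            · exact Or.inr ⟨hlt, by rw [show w + i - w = i by ring]; exact (hmem i).mp hi⟩
          · rintro (hx | ⟨hlt, hx⟩)
            · exact Or.inl ((hmem x).mpr hx)
            · exact Or.inr (Or.inr ⟨x - w, (hmem _).mpr hx, by ring, by omega⟩)
        have hih := ih (w :: rp) (PySem.Set.update ms temp) hmem2
        rw [pvOuterA, htemp]
        constructor
        · rintro (h | h)
          · exact absurd h hnow
          · exact hih.1 h
        · intro h
          have hrest : ¬ pvHitFrom C (w :: rp) l := fun hh => h (Or.inr hh)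
          have := hih.2 hrest
          simpa using this

def pvLayer (C : Int) (p : List Int) : PySem.Set Int :=
  p.foldl (fun ms w =>
    PySem.Set.update ms ((ms.filter (fun s => decide (s + w < C))).map (fun s => s + w)))
    (PySem.Set.ofList [0])

def pvAll (C : Int) (ws : List Int) : List (Nat × Int) :=
  (List.range (ws.length + 1)).flatMap (fun k => (pvLayer C (ws.take k)).map (fun s => (k, s)))

theorem pvHitFrom_iff (C : Int) : ∀ (l rp : List Int),
    pvHitFrom C rp l ↔
      ∃ k s, k < l.length ∧ pvInM C ((l.take k).reverse ++ rp) s ∧ s + l.getD k 0 = C := by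
  intro l
  induction l with
  | nil => intro rp; simp [pvHitFrom]
  | cons w l ih =>
      intro rp
      show ((∃ s, pvInM C rp s ∧ s + w = C) ∨ pvHitFrom C (w :: rp) l) ↔ _
      rw [ih (w :: rp)]
      constructor
      · rintro (⟨s, hs, hsw⟩ | ⟨k, s, hk, hs, hsw⟩)
        · exact ⟨0, s, by simp, by simpa using hs, by simpa using hsw⟩
        · refine ⟨k + 1, s, by simp; omega, ?_, by simpa using hsw⟩
          simpa using hs
      · rintro ⟨k, s, hk, hs, hsw⟩
        cases k with
        | zero => exact Or.inl ⟨s, by simpa using hs, by simpa using hsw⟩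
        | succ k =>
            refine Or.inr ⟨k, s, by simp at hk; omega, ?_, by simpa using hsw⟩
            simpa using hs

theorem pvLayer_step (C : Int) (p : List Int) (w : Int) :
    pvLayer C (p ++ [w]) =
      PySem.Set.update (pvLayer C p)
        (((pvLayer C p).filter (fun s => decide (s + w < C))).map (fun s => s + w)) := by
  simp [pvLayer, List.foldl_append]

theorem mem_pvLayer (C : Int) (p : List Int) (x : Int) :
    x ∈ pvLayer C p ↔ pvInM C p.reverse x := by
  induction p using List.reverseRecOn generalizing x with
  | nil => simp [pvLayer, PySem.Set.mem_ofList, pvInM]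
  | append_singleton p w ih =>
      rw [pvLayer_step, PySem.Set.mem_update, List.reverse_append]
      show _ ↔ pvInM C (w :: p.reverse) x
      show _ ↔ pvInM C p.reverse x ∨ (x < C ∧ pvInM C p.reverse (x - w))
      constructor
      · rintro (hx | hx)
        · exact Or.inl ((ih _).mp hx)
        · simp only [List.mem_map, List.mem_filter] at hx
          obtain ⟨s, ⟨hs, hlt⟩, rfl⟩ := hx
          have hlt2 : s + w < C := of_decide_eq_true hlt
          exact Or.inr ⟨hlt2, by rw [show s + w - w = s by ring]; exact (ih _).mp hs⟩
      · rintro (hx | ⟨hlt, hx⟩)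
        · exact Or.inl ((ih _).mpr hx)
        · refine Or.inr ?_
          simp only [List.mem_map, List.mem_filter]
          exact ⟨x - w, ⟨(ih _).mpr hx, decide_eq_true (by omega)⟩, by ring⟩

theorem pvFoldlAddLen (xs : List Int) : ∀ (s : PySem.Set Int),
    (List.foldl PySem.Set.add s xs).length ≤ s.length + xs.length := by
  induction xs with
  | nil => simp
  | cons x l ih =>
      intro s
      simp only [List.foldl_cons, List.length_cons]
      have h1 : (PySem.Set.add s x).length ≤ s.length + 1 := by
        unfold PySem.Set.add
        split <;> simp
      have h2 := ih (PySem.Set.add s x)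
      omega

theorem length_pvLayer (C : Int) (p : List Int) : (pvLayer C p).length ≤ 2 ^ p.length := by
  induction p using List.reverseRecOn with
  | nil => simp [pvLayer, PySem.Set.ofList]
  | append_singleton p w ih =>
      rw [pvLayer_step]
      have h1 := pvFoldlAddLen
        (((pvLayer C p).filter (fun s => decide (s + w < C))).map (fun s => s + w)) (pvLayer C p)
      have h2 : (((pvLayer C p).filter (fun s => decide (s + w < C))).map (fun s => s + w)).length
          ≤ (pvLayer C p).length := by
        rw [List.length_map]
        exact List.length_filter_le _ _
      have h3 : (2 : Nat) ^ (p ++ [w]).length = 2 ^ p.length * 2 := by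
        rw [List.length_append]
        simp [pow_succ]
      rw [h3]
      calc (PySem.Set.update (pvLayer C p) _).length
          ≤ (pvLayer C p).length + _ := h1
        _ ≤ 2 ^ p.length * 2 := by omega

theorem mem_pvAll (C : Int) (ws : List Int) (k : Nat) (s : Int) :
    (k, s) ∈ pvAll C ws ↔ k ≤ ws.length ∧ pvInM C ((ws.take k).reverse) s := by
  unfold pvAll
  simp only [List.mem_flatMap, List.mem_range, List.mem_map]
  constructor
  · rintro ⟨j, hj, x, hx, hpair⟩
    obtain ⟨rfl, rfl⟩ : j = k ∧ x = s := by
      constructor <;> [exact congrArg Prod.fst hpair; exact congrArg Prod.snd hpair]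
    exact ⟨by omega, (mem_pvLayer C _ x).mp hx⟩
  · rintro ⟨hk, hs⟩
    exact ⟨k, by omega, s, (mem_pvLayer C _ s).mpr hs, rfl⟩

theorem pvSumLe (l : List Nat) (b : Nat) (h : ∀ x ∈ l, x ≤ b) : l.sum ≤ l.length * b := by
  induction l with
  | nil => simp
  | cons x l ih =>
      simp only [List.sum_cons, List.length_cons]
      have h1 := ih (fun y hy => h y (by simp [hy]))
      have h2 := h x (by simp)
      nlinarith

theorem length_pvAll (C : Int) (ws : List Int) :
    (pvAll C ws).length ≤ (ws.length + 1) * 2 ^ ws.length := by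
  unfold pvAll
  rw [List.length_flatMap]
  have hb : ∀ x ∈ (List.range (ws.length + 1)).map
      (fun k => ((pvLayer C (ws.take k)).map (fun s => (k, s))).length), x ≤ 2 ^ ws.length := by
    intro x hx
    simp only [List.mem_map, List.mem_range] at hx
    obtain ⟨k, hk, rfl⟩ := hx
    rw [List.length_map]
    calc (pvLayer C (ws.take k)).length ≤ 2 ^ (ws.take k).length := length_pvLayer C _
      _ ≤ 2 ^ ws.length := Nat.pow_le_pow_right (by norm_num) (by simp)
  have := pvSumLe _ _ hb
  simpa using this

def pvClosed (C : Int) (ws : List Int) (seen : PySem.Set (Nat × Int)) : Nat × Int → Prop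
  | (k, s) => k ≠ ws.length →
      (s + ws.getD k 0 ≠ C ∧ (k + 1, s) ∈ seen ∧
        (s + ws.getD k 0 < C → (k + 1, s + ws.getD k 0) ∈ seen))

theorem pvClosedMono (C : Int) (ws : List Int) (s1 s2 : PySem.Set (Nat × Int))
    (h : ∀ x ∈ s1, x ∈ s2) (st : Nat × Int) (hc : pvClosed C ws s1 st) :
    pvClosed C ws s2 st := by
  obtain ⟨k, s⟩ := st
  intro hne
  obtain ⟨a, b, c⟩ := hc hne
  exact ⟨a, h _ b, fun hlt => h _ (c hlt)⟩

theorem pvTakeSucc (ws : List Int) (k : Nat) (h : k < ws.length) :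
    (ws.take (k + 1)).reverse = ws.getD k 0 :: (ws.take k).reverse := by
  have hg : ws.getD k 0 = ws[k] := List.getD_eq_getElem ws 0 h
  rw [hg, List.take_add_one, List.getElem?_eq_getElem h]
  simp

theorem pvContainsFalse {α : Type} [BEq α] [LawfulBEq α] (s : PySem.Set α) (x : α) :
    PySem.Set.contains s x = false ↔ x ∉ s := by
  rw [← PySem.Set.contains_iff]
  cases PySem.Set.contains s x <;> simp

theorem pvB_final (C : Int) (ws : List Int) (seen : PySem.Set (Nat × Int))
    (hvalid : ∀ st ∈ seen, st ∈ pvAll C ws)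
    (h00 : ((0 : Nat), (0 : Int)) ∈ seen)
    (hclosed : ∀ st ∈ seen, pvClosed C ws seen st) :
    (pvHit C ws → pvFinishB seen = C) ∧
    (¬ pvHit C ws → pvIsMax C ws.reverse (pvFinishB seen)) := by
  have hcomp : ∀ k, k ≤ ws.length → ∀ s, pvInM C ((ws.take k).reverse) s → (k, s) ∈ seen := by
    intro k
    induction k with
    | zero =>
        intro _ s hs
        have : s = 0 := by simpa [pvInM] using hs
        subst this
        exact h00
    | succ k ih =>
        intro hk s hs
        have hklt : k < ws.length := by omega
        rw [pvTakeSucc ws k hklt] at hs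
        rcases hs with hs | ⟨hlt, hs⟩
        · have hk1 := ih (by omega) s hs
          exact ((hclosed _ hk1) (by omega)).2.1
        · have hk1 := ih (by omega) (s - ws.getD k 0) hs
          have := ((hclosed _ hk1) (by omega)).2.2
          rw [show s - ws.getD k 0 + ws.getD k 0 = s by ring] at this
          exact this hlt
  have hnohit : ¬ pvHit C ws := by
    rintro ⟨k, s, hk, hs, heq⟩
    have hmem := hcomp k (by omega) s hs
    exact ((hclosed _ hmem) (by omega)).1 heq
  refine ⟨fun h => absurd h hnohit, fun _ => ?_⟩
  have h0 : (0 : Int) ∈ seen.map (fun st => st.2) :=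
    List.mem_map.mpr ⟨((0 : Nat), (0 : Int)), h00, rfl⟩
  obtain ⟨m, hm⟩ : ∃ m, PySem.List.max? (seen.map (fun st => st.2)) (fun x => x) = some m := by
    cases hc : PySem.List.max? (seen.map (fun st => st.2)) (fun x => x) with
    | none => exact absurd ((PySem.List.max?_eq_none_iff _ _).mp hc) (List.ne_nil_of_mem h0)
    | some m => exact ⟨m, rfl⟩
  unfold pvFinishB
  rw [hm, Option.getD_some]
  constructor
  · have hmm := PySem.List.max?_mem hm
    obtain ⟨⟨k, s⟩, hks, rfl⟩ := List.mem_map.mp hmm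
    obtain ⟨hk, hInM⟩ := (mem_pvAll C ws k s).mp (hvalid _ hks)
    have hsplit : (ws.drop k).reverse ++ (ws.take k).reverse = ws.reverse := by
      rw [← List.reverse_append, List.take_append_drop]
    rw [← hsplit]
    exact pvInM_ext C _ _ _ hInM
  · intro y hy
    have : (ws.length, y) ∈ seen := by
      apply hcomp ws.length le_rfl
      rwa [List.take_length]
    exact PySem.List.max?_isMax hm y (List.mem_map.mpr ⟨_, this, rfl⟩)

theorem pvPushInv (C : Int) (ws : List Int) (p : Nat × Int) (stack : List (Nat × Int))
    (seen : PySem.Set (Nat × Int)) (hp : p ∈ pvAll C ws)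
    (h1 : ∀ st ∈ stack, st ∈ seen) (h2 : ∀ st ∈ seen, st ∈ pvAll C ws)
    (h3 : seen.Nodup) (h4 : stack.Nodup) :
    (∀ st ∈ (if PySem.Set.contains seen p = false then p :: stack else stack),
        st ∈ (if PySem.Set.contains seen p = false then PySem.Set.add seen p else seen)) ∧
    (∀ st ∈ (if PySem.Set.contains seen p = false then PySem.Set.add seen p else seen), st ∈ pvAll C ws) ∧
    (if PySem.Set.contains seen p = false then PySem.Set.add seen p else seen).Nodup ∧
    (if PySem.Set.contains seen p = false then p :: stack else stack).Nodup ∧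
    (∀ x, x ∈ (if PySem.Set.contains seen p = false then PySem.Set.add seen p else seen) ↔ x ∈ seen ∨ x = p) ∧
    (∀ x ∈ (if PySem.Set.contains seen p = false then p :: stack else stack), x ∈ stack ∨ x = p) ∧
    (∀ x ∈ stack, x ∈ (if PySem.Set.contains seen p = false then p :: stack else stack)) ∧
    (p ∉ (if PySem.Set.contains seen p = false then p :: stack else stack) → p ∈ seen) ∧
    (if PySem.Set.contains seen p = false then p :: stack else stack).length + 2 * seen.length ≤
      stack.length + 2 * (if PySem.Set.contains seen p = false then PySem.Set.add seen p else seen).length := by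
  by_cases hc : PySem.Set.contains seen p = false
  · have hnp : p ∉ seen := (pvContainsFalse seen p).mp hc
    simp only [hc, if_true]
    have hadd : PySem.Set.add seen p = seen ++ [p] := PySem.Set.add_of_not_mem hnp
    refine ⟨?_, ?_, ?_, ?_, ?_, ?_, ?_, ?_, ?_⟩
    · intro st hst
      rw [PySem.Set.mem_add]
      rcases List.mem_cons.mp hst with rfl | hst
      · exact Or.inr rfl
      · exact Or.inl (h1 st hst)
    · intro st hst
      rw [PySem.Set.mem_add] at hst
      rcases hst with hst | rfl
      · exact h2 st hst
      · exact hp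
    · rw [hadd]
      simp only [List.nodup_append, List.nodup_cons, List.nodup_nil, and_true, true_and, h3]
      refine ⟨by simp, ?_⟩
      intro a ha b hb heq
      rw [List.mem_singleton] at hb
      subst hb
      exact hnp (heq ▸ ha)
    · rw [List.nodup_cons]
      exact ⟨fun hmem => hnp (h1 p hmem), h4⟩
    · intro x
      rw [PySem.Set.mem_add]
    · intro x hx
      rcases List.mem_cons.mp hx with rfl | hx
      · exact Or.inr rfl
      · exact Or.inl hx
    · intro x hx
      exact List.mem_cons_of_mem _ hx
    · intro hnot
      exact absurd (List.mem_cons_self) hnot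
    · rw [hadd]
      simp only [List.length_cons, List.length_append, List.length_cons, List.length_nil]
      omega
  · have hpin : p ∈ seen := by
      rw [← PySem.Set.contains_iff]
      cases h : PySem.Set.contains seen p
      · exact absurd h hc
      · rfl
    have hct : PySem.Set.contains seen p = true := by
      rw [PySem.Set.contains_iff]
      exact hpin
    simp only [hct, Bool.true_eq_false, if_false]
    refine ⟨h1, h2, h3, h4, ?_, fun x hx => Or.inl hx, fun x hx => hx, fun _ => hpin, by omega⟩
    intro x
    constructor
    · exact Or.inl
    · rintro (hx | rfl)
      · exact hx
      · exact hpin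

theorem pvB_char (C : Int) (ws : List Int) : ∀ (fuel : Nat) (stack : List (Nat × Int))
    (seen : PySem.Set (Nat × Int)),
    (∀ st ∈ stack, st ∈ seen) →
    (∀ st ∈ seen, st ∈ pvAll C ws) →
    seen.Nodup → stack.Nodup →
    ((0 : Nat), (0 : Int)) ∈ seen →
    (∀ st ∈ seen, st ∉ stack → pvClosed C ws seen st) →
    stack.length + 2 * (pvAll C ws).length ≤ fuel + 2 * seen.length →
    (pvHit C ws → pvDfsB C ws.length ws fuel stack seen = C) ∧
    (¬ pvHit C ws → pvIsMax C ws.reverse (pvDfsB C ws.length ws fuel stack seen)) := by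
  intro fuel
  induction fuel with
  | zero =>
      intro stack seen h1 h2 h3 h4 h5 h6 h7
      have hsl : seen.length ≤ (pvAll C ws).length :=
        (List.subperm_of_subset h3 h2).length_le
      have hnil : stack = [] := List.eq_nil_of_length_eq_zero (by omega)
      subst hnil
      simp only [pvDfsB]
      exact pvB_final C ws seen h2 h5 (fun st hst => h6 st hst (by simp))
  | succ fuel ih =>
      intro stack seen h1 h2 h3 h4 h5 h6 h7
      cases stack with
      | nil =>
          simp only [pvDfsB]
          exact pvB_final C ws seen h2 h5 (fun st hst => h6 st hst (by simp))
      | cons hd rest =>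
          obtain ⟨k, s⟩ := hd
          by_cases hk : k = ws.length
          · -- skip edge: k = n
            have hcl : ∀ st ∈ seen, st ∉ rest → pvClosed C ws seen st := by
              intro st hst hnr
              by_cases he : st = (k, s)
              · subst he
                intro hne
                exact absurd hk hne
              · exact h6 st hst (by simp [he, hnr])
            have hrec := ih rest seen (fun st hst => h1 st (by simp [hst])) h2 h3
              (List.Nodup.of_cons h4) h5 hcl (by simp at h7; omega)
            simp only [pvDfsB]
            rw [if_pos hk]
            exact hrec
          · by_cases ht : s + ws.getD k 0 = C
            · -- hit edge
              have hks := h1 (k, s) (by simp)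
              obtain ⟨hkle, hInM⟩ := (mem_pvAll C ws k s).mp (h2 _ hks)
              have hhit : pvHit C ws := ⟨k, s, by omega, hInM, ht⟩
              refine ⟨fun _ => ?_, fun hn => absurd hhit hn⟩
              simp only [pvDfsB]
              rw [if_neg hk, if_pos ht]
            · -- expand: two guarded pushes
              have hks := h1 (k, s) (by simp)
              obtain ⟨hkle, hInM⟩ := (mem_pvAll C ws k s).mp (h2 _ hks)
              have hklt : k < ws.length := by omega
              have hrestsub : ∀ st ∈ rest, st ∈ seen := fun st hst => h1 st (by simp [hst])
              have hrestnd : rest.Nodup := List.Nodup.of_cons h4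
              have hP2valid : ((k + 1 : Nat), s) ∈ pvAll C ws := by
                rw [mem_pvAll, pvTakeSucc ws k hklt]
                exact ⟨by omega, Or.inl hInM⟩
              simp only [pvDfsB]
              rw [if_neg hk, if_neg ht]
              by_cases htC : s + ws.getD k 0 < C
              · have hP1valid : ((k + 1 : Nat), s + ws.getD k 0) ∈ pvAll C ws := by
                  rw [mem_pvAll, pvTakeSucc ws k hklt]
                  refine ⟨by omega, Or.inr ⟨htC, ?_⟩⟩
                  rw [show s + ws.getD k 0 - ws.getD k 0 = s by ring]
                  exact hInM
                simp only [htC, true_and]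
                obtain ⟨a1, a2, a3, a4, a5, a6, a7, a8, a9⟩ :=
                  pvPushInv C ws (k + 1, s + ws.getD k 0) rest seen hP1valid hrestsub h2 h3 hrestnd
                set seen1 := if PySem.Set.contains seen (k + 1, s + ws.getD k 0) = false
                  then PySem.Set.add seen (k + 1, s + ws.getD k 0) else seen with hseen1
                set st1 := if PySem.Set.contains seen (k + 1, s + ws.getD k 0) = false
                  then (k + 1, s + ws.getD k 0) :: rest else rest with hst1
                obtain ⟨b1, b2, b3, b4, b5, b6, b7, b8, b9⟩ :=
                  pvPushInv C ws (k + 1, s) st1 seen1 hP2valid a1 a2 a3 a4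
                set seen2 := if PySem.Set.contains seen1 (k + 1, s) = false
                  then PySem.Set.add seen1 (k + 1, s) else seen1 with hseen2
                set st2 := if PySem.Set.contains seen1 (k + 1, s) = false
                  then (k + 1, s) :: st1 else st1 with hst2
                have hseensub : ∀ x ∈ seen, x ∈ seen2 :=
                  fun x hx => (b5 x).mpr (Or.inl ((a5 x).mpr (Or.inl hx)))
                have hcl : ∀ st ∈ seen2, st ∉ st2 → pvClosed C ws seen2 st := by
                  intro st hst hnst2
                  have hstInSeen : st ∈ seen := by
                    rcases (b5 st).mp hst with h | rfl
                    · rcases (a5 st).mp h with h' | rfl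
                      · exact h'
                      · by_cases hmem : ((k + 1 : Nat), s + ws.getD k 0) ∈ st1
                        · exact absurd (b7 _ hmem) hnst2
                        · exact a8 hmem
                    · have hP2s1 : ((k + 1 : Nat), s) ∈ seen1 := b8 hnst2
                      rcases (a5 _).mp hP2s1 with h' | heq
                      · exact h'
                      · rw [heq]
                        by_cases hmem : ((k + 1 : Nat), s + ws.getD k 0) ∈ st1
                        · rw [heq] at hnst2
                          exact absurd (b7 _ hmem) hnst2
                        · exact a8 hmem
                  by_cases he : st = (k, s)
                  · subst he
                    intro _
                    refine ⟨ht, (b5 _).mpr (Or.inr rfl), fun _ => ?_⟩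
                    exact (b5 _).mpr (Or.inl ((a5 _).mpr (Or.inr rfl)))
                  · have hnrest : st ∉ rest := by
                      intro hr
                      exact hnst2 (b7 _ (a7 _ hr))
                    exact pvClosedMono C ws seen seen2 hseensub st
                      (h6 st hstInSeen (by simp [he, hnrest]))
                exact ih st2 seen2 b1 b2 b3 b4 (hseensub _ h5) hcl
                  (by simp only [List.length_cons] at h7; omega)
              · simp only [htC, false_and, if_false]
                obtain ⟨b1, b2, b3, b4, b5, b6, b7, b8, b9⟩ :=
                  pvPushInv C ws (k + 1, s) rest seen hP2valid hrestsub h2 h3 hrestnd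
                set seen2 := if PySem.Set.contains seen (k + 1, s) = false
                  then PySem.Set.add seen (k + 1, s) else seen with hseen2
                set st2 := if PySem.Set.contains seen (k + 1, s) = false
                  then (k + 1, s) :: rest else rest with hst2
                have hseensub : ∀ x ∈ seen, x ∈ seen2 := fun x hx => (b5 x).mpr (Or.inl hx)
                have hcl : ∀ st ∈ seen2, st ∉ st2 → pvClosed C ws seen2 st := by
                  intro st hst hnst2
                  have hstInSeen : st ∈ seen := by
                    rcases (b5 st).mp hst with h | rfl
                    · exact h
                    · exact b8 hnst2
                  by_cases he : st = (k, s)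
                  · subst he
                    intro _
                    exact ⟨ht, (b5 _).mpr (Or.inr rfl), fun hlt => absurd hlt htC⟩
                  · have hnrest : st ∉ rest := by
                      intro hr
                      exact hnst2 (b7 _ hr)
                    exact pvClosedMono C ws seen seen2 hseensub st
                      (h6 st hstInSeen (by simp [he, hnrest]))
                exact ih st2 seen2 b1 b2 b3 b4 (hseensub _ h5) hcl
                  (by simp only [List.length_cons] at h7; omega)

-- ===== VERDICT (by name: the statement is the Claim_ definition above) =====
theorem weightCapacity_spec : Claim_equal_weightCapacity := by
  intro weights maxCapacity _
  unfold Spec_weightCapacity weightCapacity weightCapacity_alt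
  simp only
  set C := maxCapacity
  set n := weights.length with hn
  have hA := pvA_char C weights [] (PySem.Set.ofList [0]) (by
    intro x
    rw [PySem.Set.mem_ofList]
    show x ∈ [0] ↔ pvInM C [] x
    simp [pvInM])
  have hB := pvB_char C weights (2 + 2 * (n + 1) * 2 ^ n) [(0, 0)] (PySem.Set.ofList [(0, 0)])
    (by intro st hst; simpa using hst)
    (by
      intro st hst
      rw [PySem.Set.mem_ofList] at hst
      simp at hst
      subst hst
      rw [mem_pvAll]
      exact ⟨Nat.zero_le _, by simp [pvInM_zero]⟩)
    (PySem.Set.nodup_ofList _)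
    (by simp)
    (by rw [PySem.Set.mem_ofList]; simp)
    (by
      intro st hst hnot
      rw [PySem.Set.mem_ofList] at hst
      simp at hst
      exact absurd (by simp [hst] : st ∈ [((0 : Nat), (0 : Int))]) hnot)
    (by
      have hAl := length_pvAll C weights
      have hl : (PySem.Set.ofList [((0 : Nat), (0 : Int))]).length = 1 := rfl
      rw [hl]
      simp only [List.length_cons, List.length_nil]
      rw [mul_assoc, hn]
      omega)
  have hconv : pvHitFrom C [] weights ↔ pvHit C weights := by
    rw [pvHitFrom_iff]
    unfold pvHit
    constructor
    · rintro ⟨k, s, hh1, hh2, hh3⟩; exact ⟨k, s, hh1, by simpa using hh2, hh3⟩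
    · rintro ⟨k, s, hh1, hh2, hh3⟩; exact ⟨k, s, hh1, by simpa using hh2, hh3⟩
  by_cases hhit : pvHit C weights
  · rw [hA.1 (hconv.mpr hhit), hB.1 hhit]
  · have hh1 := hA.2 (fun h => hhit (hconv.mp h))
    have hh2 := hB.2 hhit
    simp only [List.append_nil] at hh1
    exact le_antisymm (hh2.2 _ hh1.1) (hh1.2 _ hh2.1)
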